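-- pv_equiv track=rewrite | github.com/Echo-Ai-Protocol/echo-ai-protocol | tools/candidate_shortlist.py | lane_balanced_top
-- ===== SOURCE A (Python) =====
-- from typing import Any, Dict, List, Tuple
--
-- def lane_balanced_top(
--     rows: List[Dict[str, Any]],
--     top_n: int,
--     min_code: int,
--     min_research: int,
--     min_ops: int,
-- ) -> List[Dict[str, Any]]:
--     by_score = sorted(rows, key=lambda r: (-int(r.get("score_total", 0)), r.get("candidate_id", "")))
--     out: List[Dict[str, Any]] = []
--     used_ids = set()
--
--     minima: List[Tuple[str, int]] = [
--         ("code", max(0, min_code)),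
--         ("research", max(0, min_research)),
--         ("ops", max(0, min_ops)),
--     ]
--     for lane, required in minima:
--         picks = [r for r in by_score if r.get("lane") == lane and r.get("candidate_id") not in used_ids]
--         for row in picks[:required]:
--             out.append(row)
--             used_ids.add(row.get("candidate_id"))
--
--     remaining = [r for r in by_score if r.get("candidate_id") not in used_ids]
--     for row in remaining:
--         if len(out) >= top_n:
--             break
--         out.append(row)
--         used_ids.add(row.get("candidate_id"))
--
--     return out[:top_n]
-- ===== SOURCE B (Python) =====
-- def lane_balanced_top(rows, top_n, min_code, min_research, min_ops):
--     # Recursive shrinking-pool formulation: no used_ids set, no output accumulator,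
--     # no break loop; each lane consumes from the pool, then the pool itself is the fill.
--     def go(pool, quotas):
--         if not quotas:
--             return [], pool
--         lane, minimum = quotas[0]
--         take = [r for r in pool if r.get("lane") == lane][:max(0, minimum)]
--         taken = {r.get("candidate_id") for r in take}
--         picks, rest = go([r for r in pool if r.get("candidate_id") not in taken], quotas[1:])
--         return take + picks, rest
--
--     key = lambda r: (-int(r.get("score_total", 0)), r.get("candidate_id", ""))
--     head, pool = go(sorted(rows, key=key),
--                     [("code", min_code), ("research", min_research), ("ops", min_ops)])
--     return (head + pool[:max(0, top_n - len(head))])[:top_n]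
-- ===== Notes on version B (the rewrite author's own statement) =====
-- stated objective: alternative
-- what changed: B is a recursive shrinking-pool formulation: each lane quota recursively consumes its picks from the pool and removes their ids from the pool itself, so there is no used_ids set, no output accumulator and no break-based fill loop - the pool left after the recursion IS the fill, sliced once.
import Mathlib
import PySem

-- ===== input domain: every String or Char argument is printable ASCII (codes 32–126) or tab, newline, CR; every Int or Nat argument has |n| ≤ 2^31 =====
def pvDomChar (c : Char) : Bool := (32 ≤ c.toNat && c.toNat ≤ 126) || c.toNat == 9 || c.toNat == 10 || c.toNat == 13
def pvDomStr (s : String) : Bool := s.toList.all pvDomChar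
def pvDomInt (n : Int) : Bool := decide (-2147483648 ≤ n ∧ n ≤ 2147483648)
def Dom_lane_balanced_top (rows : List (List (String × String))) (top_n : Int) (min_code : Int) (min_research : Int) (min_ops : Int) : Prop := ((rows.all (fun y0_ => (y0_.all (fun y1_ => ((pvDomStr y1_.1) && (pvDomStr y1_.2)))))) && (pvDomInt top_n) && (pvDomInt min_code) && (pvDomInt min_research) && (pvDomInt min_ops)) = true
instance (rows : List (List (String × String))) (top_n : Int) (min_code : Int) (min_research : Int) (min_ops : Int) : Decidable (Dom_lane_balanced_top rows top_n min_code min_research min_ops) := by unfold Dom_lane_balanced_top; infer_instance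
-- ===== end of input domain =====

-- B replaces A's used_ids-set + output-accumulator + break-loop scheme by a recursion over the lane quotas that shrinks the candidate pool itself; the leftover pool is the fill (alternative decomposition, same results; return value only).


-- ===== PORT A =====
-- r.get(k): first-match lookup in the association-list row (the dict per type convention)
def pvGet (r : List (String × String)) (k : String) : Option String :=
  (r.find? (fun p => p.1 == k)).map (fun p => p.2)

-- int(r.get("score_total", 0)): 0 when the key is absent; Pre_ guarantees ofStr? succeeds when present
def pvScore (r : List (String × String)) : Int :=
  match pvGet r "score_total" with
  | none => 0
  | some s => (PySem.Int.ofStr? s).getD 0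

-- r.get("candidate_id", "") (sort key) and r.get("candidate_id") (the id stored in used_ids)
def pvCidKey (r : List (String × String)) : String := (pvGet r "candidate_id").getD ""
def pvCid (r : List (String × String)) : Option String := pvGet r "candidate_id"

-- one iteration of A's 'for lane, required in minima' loop
def pvLanePassA (by_score : List (List (String × String)))
    (st : List (List (String × String)) × PySem.Set (Option String))
    (lane : String) (required : Int) :
    List (List (String × String)) × PySem.Set (Option String) :=
  let picks := by_score.filter (fun r =>
    (pvGet r "lane" == some lane) && !(PySem.Set.contains st.2 (pvCid r)))
  (PySem.List.slice picks none (some required)).foldl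
    (fun st row => (st.1 ++ [row], PySem.Set.add st.2 (pvCid row))) st

-- A's final 'for row in remaining: if len(out) >= top_n: break; …' loop
def pvFillA (remaining : List (List (String × String))) (top_n : Int)
    (out : List (List (String × String))) (used : PySem.Set (Option String)) :
    List (List (String × String)) × PySem.Set (Option String) :=
  match remaining with
  | [] => (out, used)
  | r :: rest =>
    if top_n ≤ (out.length : Int) then (out, used)
    else pvFillA rest top_n (out ++ [r]) (PySem.Set.add used (pvCid r))

def lane_balanced_top (rows : List (List (String × String))) (top_n : Int) (min_code : Int) (min_research : Int) (min_ops : Int) : List (List (String × String)) :=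
  let by_score := PySem.List.sorted2 rows (fun r => -(pvScore r)) pvCidKey false
  let minima : List (String × Int) :=
    [("code", max 0 min_code), ("research", max 0 min_research), ("ops", max 0 min_ops)]
  let st := minima.foldl (fun st p => pvLanePassA by_score st p.1 p.2)
    (([] : List (List (String × String))), (PySem.Set.empty : PySem.Set (Option String)))
  let remaining := by_score.filter (fun r => !(PySem.Set.contains st.2 (pvCid r)))
  let st2 := pvFillA remaining top_n st.1 st.2
  PySem.List.slice st2.1 none (some top_n)

-- ===== PORT B =====
-- B's recursive helper go(pool, quotas): returns (lane picks, leftover pool)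
def pvGoB (pool : List (List (String × String))) (quotas : List (String × Int)) :
    List (List (String × String)) × List (List (String × String)) :=
  match quotas with
  | [] => ([], pool)
  | (lane, minimum) :: rest =>
    let take := PySem.List.slice (pool.filter (fun r => pvGet r "lane" == some lane))
      none (some (max 0 minimum))
    let taken : PySem.Set (Option String) := PySem.Set.ofList (take.map pvCid)
    let pr := pvGoB (pool.filter (fun r => !(PySem.Set.contains taken (pvCid r)))) rest
    (take ++ pr.1, pr.2)

def lane_balanced_top_alt (rows : List (List (String × String))) (top_n : Int) (min_code : Int) (min_research : Int) (min_ops : Int) : List (List (String × String)) :=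
  let by_score := PySem.List.sorted2 rows (fun r => -(pvScore r)) pvCidKey false
  let pr := pvGoB by_score [("code", min_code), ("research", min_research), ("ops", min_ops)]
  PySem.List.slice
    (pr.1 ++ PySem.List.slice pr.2 none (some (max 0 (top_n - (pr.1.length : Int)))))
    none (some top_n)

-- ===== PRECONDITION & SPEC =====
-- Pre_ excludes exactly the inputs where A raises ValueError: a row whose "score_total" value int() cannot parse.
def Pre_lane_balanced_top (rows : List (List (String × String))) (top_n : Int) (min_code : Int) (min_research : Int) (min_ops : Int) : Prop :=
  (rows.all (fun r =>
    match pvGet r "score_total" with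
    | none => true
    | some s => (PySem.Int.ofStr? s).isSome)) = true
instance (rows : List (List (String × String))) (top_n : Int) (min_code : Int) (min_research : Int) (min_ops : Int) : Decidable (Pre_lane_balanced_top rows top_n min_code min_research min_ops) := by unfold Pre_lane_balanced_top; infer_instance

def pvWitness_lane_balanced_top : (List (List (String × String))) × Int × Int × Int × Int :=
  ([[("lane", "code"), ("candidate_id", "a"), ("score_total", "5")],
    [("lane", "ops"), ("candidate_id", "b"), ("score_total", "7")]], 2, 1, 0, 0)

def Spec_lane_balanced_top (rows : List (List (String × String))) (top_n : Int) (min_code : Int) (min_research : Int) (min_ops : Int) (out : List (List (String × String))) : Prop := out = lane_balanced_top_alt rows top_n min_code min_research min_ops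
instance (rows : List (List (String × String))) (top_n : Int) (min_code : Int) (min_research : Int) (min_ops : Int) (out : List (List (String × String))) : Decidable (Spec_lane_balanced_top rows top_n min_code min_research min_ops out) := by unfold Spec_lane_balanced_top; infer_instance

-- ===== CLAIM (what is proved, stated in full; the proofs are below) =====
def Claim_equal_lane_balanced_top : Prop := ∀ (rows : List (List (String × String))) (top_n : Int) (min_code : Int) (min_research : Int) (min_ops : Int), Dom_lane_balanced_top rows top_n min_code min_research min_ops → Pre_lane_balanced_top rows top_n min_code min_research min_ops → Spec_lane_balanced_top rows top_n min_code min_research min_ops (lane_balanced_top rows top_n min_code min_research min_ops)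

-- ===== LEMMAS AND PROOFS =====

-- A's simultaneous (out, used) fold is an extend + a separate used update
theorem pv_fold_pair (l : List (List (String × String)))
    (out : List (List (String × String))) (used : PySem.Set (Option String)) :
    l.foldl (fun st row => (st.1 ++ [row], PySem.Set.add st.2 (pvCid row))) (out, used)
    = (out ++ l, l.foldl (fun u r => PySem.Set.add u (pvCid r)) used) := by
  induction l generalizing out used with
  | nil => simp
  | cons r t ih => simp [List.foldl, ih]

-- membership in used_ids after adding the picks' ids, as a Bool equation
theorem pv_contains_update (s : PySem.Set (Option String)) (L : List (Option String)) (x : Option String) :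
    PySem.Set.contains (PySem.Set.update s L) x
    = (PySem.Set.contains s x || PySem.Set.contains (PySem.Set.ofList L) x) := by
  rw [Bool.eq_iff_iff]
  simp [PySem.Set.mem_update, PySem.Set.mem_ofList]

-- core invariant: A's lane fold from state (out, used) is B's recursion on the pool of unused rows
theorem pv_go_main (quotas : List (String × Int)) (by_score : List (List (String × String)))
    (out : List (List (String × String))) (used : PySem.Set (Option String)) :
    (quotas.foldl (fun st p => pvLanePassA by_score st p.1 (max 0 p.2)) (out, used)).1
      = out ++ (pvGoB (by_score.filter (fun r => !(PySem.Set.contains used (pvCid r)))) quotas).1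
    ∧ by_score.filter (fun r =>
        !(PySem.Set.contains
          (quotas.foldl (fun st p => pvLanePassA by_score st p.1 (max 0 p.2)) (out, used)).2
          (pvCid r)))
      = (pvGoB (by_score.filter (fun r => !(PySem.Set.contains used (pvCid r)))) quotas).2 := by
  induction quotas generalizing out used with
  | nil => simp [pvGoB]
  | cons q rest ih =>
    obtain ⟨lane, m⟩ := q
    simp only [List.foldl_cons, pvGoB]
    have hpicks : (by_score.filter (fun r => !(PySem.Set.contains used (pvCid r)))).filter
          (fun r => pvGet r "lane" == some lane)
        = by_score.filter (fun r =>
            (pvGet r "lane" == some lane) && !(PySem.Set.contains used (pvCid r))) := by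
      rw [List.filter_filter]
    set tk := PySem.List.slice
      (by_score.filter (fun r =>
        (pvGet r "lane" == some lane) && !(PySem.Set.contains used (pvCid r))))
      none (some (max 0 m)) with htk
    have hpass : pvLanePassA by_score (out, used) lane (max 0 m)
        = (out ++ tk, PySem.Set.update used (tk.map pvCid)) := by
      simp only [pvLanePassA, ← htk]
      rw [pv_fold_pair, ← PySem.Set.update_map_eq_foldl_add]
    have hpool : by_score.filter (fun r =>
          !(PySem.Set.contains (PySem.Set.update used (tk.map pvCid)) (pvCid r)))
        = (by_score.filter (fun r => !(PySem.Set.contains used (pvCid r)))).filter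
            (fun r => !(PySem.Set.contains (PySem.Set.ofList (tk.map pvCid)) (pvCid r))) := by
      rw [List.filter_filter]
      apply List.filter_congr
      intro r _
      rw [pv_contains_update]
      simp [Bool.and_comm]
    rw [hpass, hpicks]
    have := ih (out ++ tk) (PySem.Set.update used (tk.map pvCid))
    rw [hpool] at this
    exact ⟨by rw [this.1, List.append_assoc], this.2⟩

-- A's break loop returns out ++ (first (top_n - len(out)) of remaining)
theorem pv_fill_eq (remaining : List (List (String × String))) (top_n : Int)
    (out : List (List (String × String))) (used : PySem.Set (Option String)) :
    (pvFillA remaining top_n out used).1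
    = if 0 < top_n - (out.length : Int)
      then out ++ PySem.List.slice remaining none (some (top_n - (out.length : Int)))
      else out := by
  induction remaining generalizing out used with
  | nil =>
    simp only [pvFillA]
    split_ifs with h
    · rw [PySem.List.slice_to _ (by omega)]; simp
    · rfl
  | cons r rest ih =>
    simp only [pvFillA]
    by_cases h : top_n ≤ (out.length : Int)
    · rw [if_pos h, if_neg (by omega)]
    · rw [if_neg h, ih]
      have hb : 0 < top_n - (out.length : Int) := by omega
      simp only [List.length_append, List.length_cons, List.length_nil, Nat.cast_add,
        Nat.cast_one, zero_add]
      rw [PySem.List.slice_to (r :: rest) (by omega), if_pos hb]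
      by_cases h2 : 0 < top_n - ((out.length : Int) + 1)
      · rw [if_pos h2, PySem.List.slice_to rest (by omega)]
        have ht : (top_n - (out.length : Int)).toNat
            = (top_n - ((out.length : Int) + 1)).toNat + 1 := by omega
        rw [ht, List.take_succ_cons, List.append_assoc, List.singleton_append]
      · rw [if_neg h2]
        have ht : (top_n - (out.length : Int)).toNat = 1 := by omega
        rw [ht]
        simp

-- ===== VERDICT (by name: the statement is the Claim_ definition above) =====
theorem lane_balanced_top_spec : Claim_equal_lane_balanced_top := by
  intro rows top_n min_code min_research min_ops _ _
  unfold Spec_lane_balanced_top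
  simp only [lane_balanced_top, lane_balanced_top_alt]
  set by_score := PySem.List.sorted2 rows (fun r => -(pvScore r)) pvCidKey false
  have hmain := pv_go_main [("code", min_code), ("research", min_research), ("ops", min_ops)]
    by_score [] PySem.Set.empty
  have hempty : by_score.filter
      (fun r => !(PySem.Set.contains PySem.Set.empty (pvCid r))) = by_score := by
    simp [PySem.Set.contains, PySem.Set.empty]
  rw [hempty] at hmain
  simp only [List.foldl_cons, List.foldl_nil] at hmain ⊢
  set pr := pvGoB by_score [("code", min_code), ("research", min_research), ("ops", min_ops)]
  rw [hmain.2, pv_fill_eq, hmain.1]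
  simp only [List.nil_append] at *
  by_cases h : 0 < top_n - (pr.1.length : Int)
  · rw [if_pos h]
    have : max 0 (top_n - (pr.1.length : Int)) = top_n - (pr.1.length : Int) := by omega
    rw [this]
  · rw [if_neg h]
    have hm : max 0 (top_n - (pr.1.length : Int)) = 0 := by omega
    have h0 : PySem.List.slice pr.2 none (some (0 : Int)) = [] := by
      rw [PySem.List.slice_to pr.2 (by omega)]; simp
    rw [hm, h0]
    simp
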